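-- pv_equiv track=rewrite | github.com/Ydeshors/reconnaissance_r2d2 | version2.py | detecteSilences
-- ===== SOURCE A (Python) =====
-- def detecteSilences(dataModded):
--     tSilences = [] # paires d'indices, début et fin de silences
--     nDebut = 0
--     bSilenceEnCours = False
--     nFin = len(dataModded)
--     cpt=0
--     while cpt < len(dataModded):
--         if(dataModded[cpt]!=0):
--             if (bSilenceEnCours):
--                 tSilences.append(cpt-1) # fin du silence àt-1, début de son
--                 bSilenceEnCours = False
--         elif(not bSilenceEnCours):
--             bSilenceEnCours = True
--             tSilences.append(cpt) # début d'un silence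
--         cpt+=1
--     #possibilité de fin de silence pas détectée par présence de bruit avant la fin
--     if (bSilenceEnCours):
--         tSilences.append(nFin-1)
--     return tSilences
-- ===== SOURCE B (Python) =====
-- def detecteSilences(dataModded):
--     # collect indices of zero samples, then group maximal consecutive runs
--     zeros = [i for i, x in enumerate(dataModded) if x == 0]
--     tSilences = []
--     start = prev = None
--     for i in zeros:
--         if start is None:
--             start = i
--         elif i != prev + 1:
--             tSilences.append(start)
--             tSilences.append(prev)
--             start = i
--         prev = i
--     if start is not None:
--         tSilences.append(start)
--         tSilences.append(prev)
--     return tSilences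
-- ===== Notes on version B (the rewrite author's own statement) =====
-- stated objective: alternative
-- what changed: Replaces A's boolean-flag transition scan with collecting all zero indices first and then grouping maximal runs of consecutive indices, emitting start/end per run.
import Mathlib
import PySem

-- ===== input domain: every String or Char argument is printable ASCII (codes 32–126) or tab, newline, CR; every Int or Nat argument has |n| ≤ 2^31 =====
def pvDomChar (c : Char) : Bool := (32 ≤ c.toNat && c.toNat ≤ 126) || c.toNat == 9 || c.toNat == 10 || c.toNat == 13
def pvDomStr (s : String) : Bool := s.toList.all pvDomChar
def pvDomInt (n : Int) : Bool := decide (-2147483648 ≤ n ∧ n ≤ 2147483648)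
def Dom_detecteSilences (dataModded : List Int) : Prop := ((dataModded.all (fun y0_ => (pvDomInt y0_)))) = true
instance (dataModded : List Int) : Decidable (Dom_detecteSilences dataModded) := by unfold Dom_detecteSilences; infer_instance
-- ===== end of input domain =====

-- B replaces A's boolean-flag transition scan by collecting zero indices and grouping
-- consecutive runs (objective: alternative decomposition, same cost, same return value).

-- ===== PORT A =====
-- A's while-loop: walk the list with counter cpt, flag bSilenceEnCours, accumulator tSilences
def detecteSilencesLoop (rest : List Int) (cpt : Int) (flag : Bool) (acc : List Int) :
    List Int × Bool :=
  match rest with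
  | [] => (acc, flag)
  | x :: r =>
    if x ≠ 0 then
      if flag then detecteSilencesLoop r (cpt + 1) false (acc ++ [cpt - 1])
      else detecteSilencesLoop r (cpt + 1) flag acc
    else if !flag then detecteSilencesLoop r (cpt + 1) true (acc ++ [cpt])
    else detecteSilencesLoop r (cpt + 1) flag acc

def detecteSilences (dataModded : List Int) : List Int :=
  let nFin : Int := dataModded.length
  let res := detecteSilencesLoop dataModded 0 false []
  if res.2 then res.1 ++ [nFin - 1] else res.1

-- ===== PORT B =====
-- zeros = [i for i, x in enumerate(dataModded) if x == 0]
def detecteSilencesZeros (d : List Int) : List Int :=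
  ((PySem.List.enumerate d 0).filter (fun p => p.2 == 0)).map (fun p => p.1)

-- the for-loop over zeros; state = optional (start, prev) of the open run
def detecteSilencesGroup (zs : List Int) (st : Option (Int × Int)) (res : List Int) :
    List Int :=
  match zs with
  | [] =>
    match st with
    | none => res
    | some (s, p) => res ++ [s, p]
  | i :: r =>
    match st with
    | none => detecteSilencesGroup r (some (i, i)) res
    | some (s, p) =>
      if i ≠ p + 1 then detecteSilencesGroup r (some (i, i)) (res ++ [s, p])
      else detecteSilencesGroup r (some (s, i)) res

def detecteSilences_alt (dataModded : List Int) : List Int :=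
  detecteSilencesGroup (detecteSilencesZeros dataModded) none []

-- ===== PRECONDITION & SPEC =====
def Spec_detecteSilences (dataModded : List Int) (out : List Int) : Prop := out = detecteSilences_alt dataModded
instance (dataModded : List Int) (out : List Int) : Decidable (Spec_detecteSilences dataModded out) := by unfold Spec_detecteSilences; infer_instance

-- ===== CLAIM =====
def Claim_equal_detecteSilences : Prop := ∀ (dataModded : List Int), Dom_detecteSilences dataModded → Spec_detecteSilences dataModded (detecteSilences dataModded)

-- ===== LEMMAS AND PROOFS =====

-- A's loop followed by the trailing "if flag: append nFin-1" step, where nFin = c + r.length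
def aEnd (r : List Int) (c : Int) (flag : Bool) (acc : List Int) : List Int :=
  let res := detecteSilencesLoop r c flag acc
  if res.2 then res.1 ++ [c + (r.length : Int) - 1] else res.1

-- indices (from c) of the zero entries of r
def zerosOf : List Int → Int → List Int
  | [], _ => []
  | x :: r, c => if x = 0 then c :: zerosOf r (c + 1) else zerosOf r (c + 1)

lemma zeros_eq (d : List Int) : ∀ c : Int,
    ((PySem.List.enumerate d c).filter (fun p => p.2 == 0)).map (fun p => p.1) = zerosOf d c := by
  induction d with
  | nil => intro c; simp [PySem.List.enumerate_nil, zerosOf]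
  | cons x r ih =>
    intro c
    by_cases hx : x = 0 <;>
      simp [PySem.List.enumerate_cons, zerosOf, hx, ih]

-- joint invariant: open-run states of A and B correspond
lemma run_inv (r : List Int) :
    (∀ (c : Int) (res : List Int) (s : Int),
      aEnd r c true (res ++ [s]) = detecteSilencesGroup (zerosOf r c) (some (s, c - 1)) res) ∧
    (∀ (c : Int) (res : List Int) (s p : Int), p ≤ c - 2 →
      aEnd r c false (res ++ [s, p]) = detecteSilencesGroup (zerosOf r c) (some (s, p)) res) := by
  induction r with
  | nil =>
    constructor
    · intro c res s
      simp [aEnd, detecteSilencesLoop, zerosOf, detecteSilencesGroup]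
    · intro c res s p _
      simp [aEnd, detecteSilencesLoop, zerosOf, detecteSilencesGroup]
  | cons x r ih =>
    constructor
    · intro c res s
      by_cases hx : x = 0
      · -- zero continues the run: B extends prev, A keeps the flag
        have h := ih.1 (c + 1) res s
        simp only [aEnd] at h
        rw [show (c + 1) + (r.length : Int) - 1 = c + ((r.length : Int) + 1) - 1 from by ring] at h
        simp [aEnd, detecteSilencesLoop, detecteSilencesGroup, zerosOf, hx]
        simpa using h
      · -- nonzero closes the run in A; B keeps (s, c-1) pending
        have h := ih.2 (c + 1) res s (c - 1) (by omega)
        simp only [aEnd] at h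
        rw [show (c + 1) + (r.length : Int) - 1 = c + ((r.length : Int) + 1) - 1 from by ring] at h
        simp [aEnd, detecteSilencesLoop, zerosOf, hx]
        simpa [List.append_assoc] using h
    · intro c res s p hp
      by_cases hx : x = 0
      · -- new run starts at c: B flushes the pending pair (c ≠ p+1 since p ≤ c-2)
        have h := ih.1 (c + 1) (res ++ [s, p]) c
        have hcp : c ≠ p + 1 := by omega
        simp only [aEnd] at h
        rw [show (c + 1) + (r.length : Int) - 1 = c + ((r.length : Int) + 1) - 1 from by ring] at h
        simp [aEnd, detecteSilencesLoop, detecteSilencesGroup, zerosOf, hx, hcp]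
        simpa [List.append_assoc] using h
      · have h := ih.2 (c + 1) res s p (by omega)
        simp only [aEnd] at h
        rw [show (c + 1) + (r.length : Int) - 1 = c + ((r.length : Int) + 1) - 1 from by ring] at h
        simp [aEnd, detecteSilencesLoop, zerosOf, hx]
        simpa using h

lemma closed_inv (r : List Int) : ∀ (c : Int) (res : List Int),
    aEnd r c false res = detecteSilencesGroup (zerosOf r c) none res := by
  induction r with
  | nil => intro c res; simp [aEnd, detecteSilencesLoop, zerosOf, detecteSilencesGroup]
  | cons x r ih =>
    intro c res
    by_cases hx : x = 0
    · have h := (run_inv r).1 (c + 1) res c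
      simp only [aEnd] at h
      rw [show (c + 1) + (r.length : Int) - 1 = c + ((r.length : Int) + 1) - 1 from by ring] at h
      simp [aEnd, detecteSilencesLoop, detecteSilencesGroup, zerosOf, hx]
      simpa using h
    · have h := ih (c + 1) res
      simp only [aEnd] at h
      rw [show (c + 1) + (r.length : Int) - 1 = c + ((r.length : Int) + 1) - 1 from by ring] at h
      simp [aEnd, detecteSilencesLoop, zerosOf, hx]
      simpa using h

-- ===== VERDICT =====
theorem detecteSilences_spec : Claim_equal_detecteSilences := by
  intro d _
  unfold Spec_detecteSilences detecteSilences detecteSilences_alt detecteSilencesZeros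
  rw [zeros_eq]
  have h := closed_inv d 0 []
  simp only [aEnd, zero_add] at h
  exact h
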